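-- pv_equiv track=rewrite | github.com/liuxunchenglxc/Reducio | Main/differentiable_search.py | get_adjacency_matrix_with_params
-- ===== SOURCE A (Python) =====
-- def get_units_by_gene(gene):
--     return gene.split("-")
--
-- def get_adjacency_matrix_with_params(gene: str):
--     gene_units = get_units_by_gene(gene)[1:-1]
--     matrix = [[0 for _ in range(len(gene_units) + 2)] for _ in range(len(gene_units) + 2)]
--     info = ['start']
--     pos = 1
--     for gene_unit in gene_units:
--         gene_unit_params = [int(i) for i in gene_unit.split(',')]
--         if gene_unit_params[0] == 1:
--             offset = gene_unit_params[1]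
--             matrix[max(pos - offset, 0)][pos] = 1
--             info.append('t:1;c:{};k:{};a:{}'.format(gene_unit_params[3], gene_unit_params[4], gene_unit_params[6]))
--         elif gene_unit_params[0] >= 2:
--             offset_a = gene_unit_params[1]
--             offset_b = gene_unit_params[2]
--             matrix[max(pos - offset_a, 0)][pos] = 1
--             matrix[max(pos - offset_b, 0)][pos] = 1
--             info.append('t:{}'.format(gene_unit_params[3]))
--         pos += 1
--     matrix[-2][-1] = 1
--     info.append('end')
--     return matrix, info
-- ===== SOURCE B (Python) =====
-- def get_adjacency_matrix_with_params(gene: str):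
--     units = gene.split("-")[1:-1]
--     params = [[int(x) for x in u.split(',')] for u in units]
--     dim = len(units) + 2
--
--     def edge(i, j):
--         if (i, j) == (dim - 2, dim - 1):
--             return 1
--         if 1 <= j <= len(params):
--             p = params[j - 1]
--             if p[0] == 1:
--                 if i == max(j - p[1], 0):
--                     return 1
--             elif p[0] >= 2:
--                 if i == max(j - p[1], 0) or i == max(j - p[2], 0):
--                     return 1
--         return 0
--
--     matrix = [[edge(i, j) for j in range(dim)] for i in range(dim)]
--     info = ['start'] + [
--         ('t:1;c:{};k:{};a:{}'.format(p[3], p[4], p[6]) if p[0] == 1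
--          else 't:{}'.format(p[3]))
--         for p in params if p[0] >= 1
--     ] + ['end']
--     return matrix, info
-- ===== Notes on version B (the rewrite author's own statement) =====
-- stated objective: alternative
-- what changed: B parses all units into a params table in a first pass, then computes each matrix cell independently with a per-cell predicate (is there a unit at column j whose offsets reach row i, or the sentinel cell) instead of A's stateful pass with sparse writes into a zero grid, and builds the info list by a filtered comprehension over the parsed params instead of appending inside the loop.
import Mathlib
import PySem

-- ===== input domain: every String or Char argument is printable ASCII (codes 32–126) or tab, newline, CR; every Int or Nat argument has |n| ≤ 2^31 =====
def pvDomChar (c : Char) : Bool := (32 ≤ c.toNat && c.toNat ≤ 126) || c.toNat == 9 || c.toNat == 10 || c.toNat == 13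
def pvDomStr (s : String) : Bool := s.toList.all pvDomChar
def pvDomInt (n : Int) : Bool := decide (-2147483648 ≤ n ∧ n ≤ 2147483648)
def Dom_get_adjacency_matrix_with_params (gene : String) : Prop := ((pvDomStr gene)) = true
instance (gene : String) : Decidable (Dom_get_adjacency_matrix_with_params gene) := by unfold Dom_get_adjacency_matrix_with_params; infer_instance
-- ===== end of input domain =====

-- B first parses every unit into a params table, then computes each matrix cell independently with
-- a per-cell predicate and builds the info list by a filtered comprehension over the params table,
-- instead of A's stateful single pass writing sparsely into a zero grid (objective: alternative).

-- ===== PORT A =====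
-- get_units_by_gene: gene.split("-"); the separator "-" is nonempty, so split? is always some
def pv_get_units_by_gene (gene : String) : List String :=
  (PySem.Str.split? gene "-").getD []

-- [int(i) for i in u.split(',')]; Pre_ guarantees every field parses (int()'s ValueError is
-- excluded), so the `getD 0` default is never used on admitted inputs
def pvParams (u : String) : List Int :=
  ((PySem.Str.split? u ",").getD []).map (fun s => (PySem.Int.ofStr? s).getD 0)

-- matrix[r][c] = 1; on admitted inputs r and c are in range (out of range the write is a no-op
-- where Python would raise IndexError — such inputs are excluded by Pre_)
def pvSet2 (m : List (List Int)) (r c : Nat) : List (List Int) :=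
  m.modify r (fun row => row.set c 1)

-- loop body of A; ip = (index, unit), pos = index + 1; params[k] is `getD k 0` (a missing index is
-- IndexError, excluded by Pre_); Python's max(pos - offset, 0) is Int.toNat of (pos - offset)
def pvStepA (st : List (List Int) × List String) (ip : Int × String) : List (List Int) × List String :=
  let pos : Int := ip.1 + 1
  let p := pvParams ip.2
  if p.getD 0 0 = 1 then
    (pvSet2 st.1 (pos - p.getD 1 0).toNat pos.toNat,
     st.2 ++ ["t:1;c:" ++ PySem.Int.toStr (p.getD 3 0) ++ ";k:" ++ PySem.Int.toStr (p.getD 4 0)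
              ++ ";a:" ++ PySem.Int.toStr (p.getD 6 0)])
  else if 2 ≤ p.getD 0 0 then
    (pvSet2 (pvSet2 st.1 (pos - p.getD 1 0).toNat pos.toNat) (pos - p.getD 2 0).toNat pos.toNat,
     st.2 ++ ["t:" ++ PySem.Int.toStr (p.getD 3 0)])
  else st

def get_adjacency_matrix_with_params (gene : String) : List (List Int) × List String :=
  let gene_units := PySem.List.slice (pv_get_units_by_gene gene) (some 1) (some (-1))
  let dim := gene_units.length + 2
  let matrix := (List.range dim).map (fun _ => (List.range dim).map (fun _ => (0 : Int)))
  let st := (PySem.List.enumerate gene_units).foldl pvStepA (matrix, ["start"])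
  -- matrix[-2][-1] = 1: dim ≥ 2, so the negative indices name rows dim-2 and dim-1
  (pvSet2 st.1 (dim - 2) (dim - 1), st.2 ++ ["end"])

-- ===== PORT B =====
-- value of B's per-cell predicate for the unit parsed as p placed at column j, row i
-- (max(j - offset, 0) is Int.toNat of (j - offset))
def pvUnitVal (p : List Int) (i j : Nat) : Int :=
  if p.getD 0 0 = 1 then
    (if i = ((j : Int) - p.getD 1 0).toNat then 1 else 0)
  else if 2 ≤ p.getD 0 0 then
    (if i = ((j : Int) - p.getD 1 0).toNat ∨ i = ((j : Int) - p.getD 2 0).toNat then 1 else 0)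
  else 0

-- B's `edge(i, j)`: 1 at the sentinel cell, else the unit at column j decides
def pvEdgeB (params : List (List Int)) (dim i j : Nat) : Int :=
  if (i, j) = (dim - 2, dim - 1) then 1
  else if 1 ≤ j ∧ j ≤ params.length then pvUnitVal (params.getD (j - 1) []) i j
  else 0

-- B's info line for one parsed unit (only used on p with p[0] >= 1)
def pvInfoB (p : List Int) : String :=
  if p.getD 0 0 = 1 then
    "t:1;c:" ++ PySem.Int.toStr (p.getD 3 0) ++ ";k:" ++ PySem.Int.toStr (p.getD 4 0)
      ++ ";a:" ++ PySem.Int.toStr (p.getD 6 0)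
  else "t:" ++ PySem.Int.toStr (p.getD 3 0)

def get_adjacency_matrix_with_params_alt (gene : String) : List (List Int) × List String :=
  let units := PySem.List.slice ((PySem.Str.split? gene "-").getD []) (some 1) (some (-1))
  let params := units.map pvParams
  let dim := units.length + 2
  ((List.range dim).map (fun i => (List.range dim).map (fun j => pvEdgeB params dim i j)),
   ["start"] ++ (params.filter (fun p => decide ((1 : Int) ≤ p.getD 0 0))).map pvInfoB ++ ["end"])

-- ===== PRECONDITION & SPEC =====
-- Pre_: exactly the genes on which Python A returns normally: in every sliced unit each
-- comma-separated field parses as int (else ValueError) and the parameter list is long enough for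
-- the indices the taken branch reads (else IndexError). (Since '-' is the unit separator, fields
-- are never negative, so the row index max(pos-offset,0) is always in range.)
def Pre_get_adjacency_matrix_with_params (gene : String) : Prop :=
  let units := PySem.List.slice (pv_get_units_by_gene gene) (some 1) (some (-1))
  ∀ i, i < units.length →
    (∀ f ∈ (PySem.Str.split? (units.getD i "") ",").getD [], (PySem.Int.ofStr? f).isSome = true) ∧
    ((pvParams (units.getD i "")).getD 0 0 = 1 → 7 ≤ (pvParams (units.getD i "")).length) ∧
    (2 ≤ (pvParams (units.getD i "")).getD 0 0 → 4 ≤ (pvParams (units.getD i "")).length)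
instance (gene : String) : Decidable (Pre_get_adjacency_matrix_with_params gene) := by
  unfold Pre_get_adjacency_matrix_with_params; infer_instance

def pvWitness_get_adjacency_matrix_with_params : String := "x-1,1,0,5,3,0,2-2,1,2,4-y"

def Spec_get_adjacency_matrix_with_params (gene : String) (out : List (List Int) × List String) : Prop := out = get_adjacency_matrix_with_params_alt gene
instance (gene : String) (out : List (List Int) × List String) : Decidable (Spec_get_adjacency_matrix_with_params gene out) := by unfold Spec_get_adjacency_matrix_with_params; infer_instance

-- ===== CLAIM (what is proved, stated in full; the proofs are below) =====
def Claim_equal_get_adjacency_matrix_with_params : Prop := ∀ (gene : String), Dom_get_adjacency_matrix_with_params gene → Pre_get_adjacency_matrix_with_params gene → Spec_get_adjacency_matrix_with_params gene (get_adjacency_matrix_with_params gene)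

-- ===== LEMMAS AND PROOFS =====

-- the edge coordinates a unit contributes, and the info line it appends (A-side shapes)
def pvEdgesU (ip : Int × String) : List (Nat × Nat) :=
  let pos : Int := ip.1 + 1
  let p := pvParams ip.2
  if p.getD 0 0 = 1 then [((pos - p.getD 1 0).toNat, pos.toNat)]
  else if 2 ≤ p.getD 0 0 then
    [((pos - p.getD 1 0).toNat, pos.toNat), ((pos - p.getD 2 0).toNat, pos.toNat)]
  else []

def pvInfoU (ip : Int × String) : List String :=
  let p := pvParams ip.2
  if p.getD 0 0 = 1 then
    ["t:1;c:" ++ PySem.Int.toStr (p.getD 3 0) ++ ";k:" ++ PySem.Int.toStr (p.getD 4 0)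
     ++ ";a:" ++ PySem.Int.toStr (p.getD 6 0)]
  else if 2 ≤ p.getD 0 0 then ["t:" ++ PySem.Int.toStr (p.getD 3 0)]
  else []

def pvApply (m : List (List Int)) (E : List (Nat × Nat)) : List (List Int) :=
  E.foldl (fun mm rc => pvSet2 mm rc.1 rc.2) m

def pvRow (i : Nat) (E : List (Nat × Nat)) (row : List Int) : List Int :=
  E.foldl (fun r rc => if rc.1 = i then r.set rc.2 1 else r) row

def pvDense (dim : Nat) (E : List (Nat × Nat)) : List (List Int) :=
  (List.range dim).map (fun i => (List.range dim).map (fun j => if (i, j) ∈ E then (1 : Int) else 0))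

-- "unit with params p placed at column j reaches row i"
def pvHit (p : List Int) (i j : Nat) : Prop :=
  (p.getD 0 0 = 1 ∧ i = ((j : Int) - p.getD 1 0).toNat) ∨
  (p.getD 0 0 ≠ 1 ∧ 2 ≤ p.getD 0 0 ∧
    (i = ((j : Int) - p.getD 1 0).toNat ∨ i = ((j : Int) - p.getD 2 0).toNat))

lemma pvStepA_eq (st : List (List Int) × List String) (ip : Int × String) :
    pvStepA st ip = (pvApply st.1 (pvEdgesU ip), st.2 ++ pvInfoU ip) := by
  simp only [pvStepA, pvEdgesU, pvInfoU, pvApply]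
  split_ifs <;> simp [List.foldl]

lemma pvFoldA (L : List (Int × String)) : ∀ (m : List (List Int)) (is : List String),
    L.foldl pvStepA (m, is) = (pvApply m (L.flatMap pvEdgesU), is ++ L.flatMap pvInfoU) := by
  induction L with
  | nil => intro m is; simp [pvApply]
  | cons ip L ih =>
      intro m is
      simp only [List.foldl_cons, pvStepA_eq, ih, List.flatMap_cons, List.append_assoc]
      simp [pvApply, List.foldl_append]

lemma pvSet2_getElem? (m : List (List Int)) (r c i : Nat) :
    (pvSet2 m r c)[i]? = m[i]?.map (fun row => if r = i then row.set c 1 else row) := by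
  by_cases h : r = i
  · subst h
    by_cases hi : r < m.length
    · simp [pvSet2, hi, List.length_modify]
    · simp [pvSet2, Nat.le_of_not_lt hi, List.length_modify]
  · simp [pvSet2, h]

lemma pvApply_getElem? (E : List (Nat × Nat)) : ∀ (m : List (List Int)) (i : Nat),
    (pvApply m E)[i]? = m[i]?.map (pvRow i E) := by
  induction E with
  | nil =>
      intro m i
      cases h : m[i]? <;> simp [pvApply, pvRow, h]
  | cons rc E ih =>
      intro m i
      simp only [pvApply, List.foldl_cons]
      rw [show (E.foldl (fun mm rc => pvSet2 mm rc.1 rc.2) (pvSet2 m rc.1 rc.2)) = pvApply (pvSet2 m rc.1 rc.2) E from rfl,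
          ih, pvSet2_getElem?, Option.map_map]
      apply congrArg (fun f => Option.map f m[i]?)
      funext row
      simp only [Function.comp, pvRow, List.foldl_cons]

lemma pvRow_getElem? (i : Nat) (E : List (Nat × Nat)) : ∀ (row : List Int) (j : Nat),
    (pvRow i E row)[j]? = if (i, j) ∈ E ∧ j < row.length then some 1 else row[j]? := by
  induction E with
  | nil => intro row j; simp [pvRow]
  | cons rc E ih =>
      intro row j
      obtain ⟨r, c⟩ := rc
      simp only [pvRow, List.foldl_cons]
      rw [show (E.foldl (fun r rc => if rc.1 = i then r.set rc.2 1 else r)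
              (if r = i then row.set c 1 else row))
            = pvRow i E (if r = i then row.set c 1 else row) from rfl, ih]
      by_cases hr : r = i <;> by_cases hj : j < row.length <;> by_cases hc : c = j <;>
        by_cases hm : (i, j) ∈ E <;>
        simp_all [List.length_set, Prod.ext_iff] <;> intros <;> omega

lemma pvApply_zero_eq_dense (dim : Nat) (E : List (Nat × Nat)) :
    pvApply ((List.range dim).map (fun _ => (List.range dim).map (fun _ => (0 : Int)))) E
      = pvDense dim E := by
  apply List.ext_getElem?
  intro i
  rw [pvApply_getElem?]
  by_cases hi : i < dim
  · have h1 : ((List.range dim).map (fun _ => (List.range dim).map (fun _ => (0 : Int))))[i]?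
        = some ((List.range dim).map (fun _ => (0 : Int))) := by
      simp [hi]
    have h2 : (pvDense dim E)[i]?
        = some ((List.range dim).map (fun j => if (i, j) ∈ E then (1 : Int) else 0)) := by
      simp [pvDense, hi]
    rw [h1, h2, Option.map_some]
    apply congrArg some
    apply List.ext_getElem?
    intro j
    rw [pvRow_getElem?]
    by_cases hj : j < dim
    · simp [hj, List.length_map, List.length_range]
      split <;> rfl
    · simp [hj, List.length_map, List.length_range]
  · simp [pvDense, Nat.le_of_not_lt hi, List.length_map, List.length_range]

-- INFO side: A's per-unit append is B's filtered comprehension line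
lemma pvInfoU_eq (ip : Int × String) :
    pvInfoU ip = if (1 : Int) ≤ (pvParams ip.2).getD 0 0 then [pvInfoB (pvParams ip.2)] else [] := by
  simp only [pvInfoU, pvInfoB]
  split_ifs <;> first | rfl | omega

lemma pvFlatMap_enumerate_info (units : List String) : ∀ (s : Int),
    (PySem.List.enumerate units s).flatMap pvInfoU
      = ((units.map pvParams).filter (fun p => decide ((1 : Int) ≤ p.getD 0 0))).map pvInfoB := by
  induction units with
  | nil => intro s; simp [PySem.List.enumerate_nil]
  | cons u units ih =>
      intro s
      rw [PySem.List.enumerate_cons, List.flatMap_cons, ih, pvInfoU_eq, List.map_cons,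
          List.filter_cons]
      by_cases h : (1 : Int) ≤ (pvParams u).getD 0 0
      · rw [if_pos h, if_pos (by simpa using h), List.map_cons]; rfl
      · rw [if_neg h, if_neg (by simpa using h)]; rfl

-- MATRIX side: membership in A's accumulated edges is B's per-cell predicate
lemma pvMem_edgesU (k : Nat) (u : String) (i j : Nat) :
    (i, j) ∈ pvEdgesU ((k : Int), u) ↔ j = k + 1 ∧ pvHit (pvParams u) i j := by
  simp only [pvEdgesU, pvHit]
  split_ifs with h1 h2
  · simp only [List.mem_singleton, Prod.mk.injEq]
    constructor
    · rintro ⟨hi, hj⟩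
      exact ⟨by omega, Or.inl ⟨h1, by omega⟩⟩
    · rintro ⟨hj, ⟨-, hi⟩ | ⟨hne, -, -⟩⟩
      · exact ⟨by omega, by omega⟩
      · exact absurd h1 hne
  · simp only [List.mem_cons, List.not_mem_nil, or_false, Prod.mk.injEq]
    constructor
    · rintro (⟨hi, hj⟩ | ⟨hi, hj⟩)
      · exact ⟨by omega, Or.inr ⟨h1, h2, Or.inl (by omega)⟩⟩
      · exact ⟨by omega, Or.inr ⟨h1, h2, Or.inr (by omega)⟩⟩
    · rintro ⟨hj, ⟨h1', -⟩ | ⟨-, -, hi | hi⟩⟩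
      · exact absurd h1' h1
      · exact Or.inl ⟨by omega, by omega⟩
      · exact Or.inr ⟨by omega, by omega⟩
  · simp only [List.not_mem_nil, false_iff, not_and]
    rintro hj (⟨h1', -⟩ | ⟨-, h2', -⟩)
    · exact absurd h1' h1
    · exact absurd h2' h2

lemma pvMem_flatMap_edges (units : List String) (i j : Nat) :
    (i, j) ∈ (PySem.List.enumerate units).flatMap pvEdgesU
      ↔ 1 ≤ j ∧ j ≤ units.length ∧ pvHit (pvParams (units.getD (j - 1) "")) i j := by
  rw [List.mem_flatMap]
  constructor
  · rintro ⟨ip, hip, hm⟩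
    rw [PySem.List.mem_enumerate_iff] at hip
    obtain ⟨k, hk, rfl⟩ := hip
    rw [show ((0 : Int) + (k : Int), units[k]) = ((k : Int), units[k]) by simp] at hm
    rw [pvMem_edgesU] at hm
    obtain ⟨hj, hh⟩ := hm
    subst hj
    refine ⟨by omega, by omega, ?_⟩
    simpa [List.getD_eq_getElem?_getD, List.getElem?_eq_getElem hk] using hh
  · rintro ⟨hj1, hjn, hh⟩
    have hk : j - 1 < units.length := by omega
    refine ⟨(((j - 1 : Nat) : Int), units[j - 1]), ?_, ?_⟩
    · rw [PySem.List.mem_enumerate_iff]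
      exact ⟨j - 1, hk, by simp⟩
    · rw [pvMem_edgesU]
      refine ⟨by omega, ?_⟩
      simpa [List.getD_eq_getElem?_getD, List.getElem?_eq_getElem hk] using hh

lemma pvUnitVal_hit (p : List Int) (i j : Nat) (h : pvHit p i j) : pvUnitVal p i j = 1 := by
  simp only [pvUnitVal, pvHit] at *
  rcases h with ⟨h1, hi⟩ | ⟨hne, h2, hi⟩
  · rw [if_pos h1, if_pos hi]
  · rw [if_neg hne, if_pos h2, if_pos hi]

lemma pvUnitVal_miss (p : List Int) (i j : Nat) (h : ¬ pvHit p i j) : pvUnitVal p i j = 0 := by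
  simp only [pvUnitVal, pvHit] at *
  split_ifs with h1 hi h2 hi2
  · exact absurd (Or.inl ⟨h1, hi⟩) h
  · rfl
  · exact absurd (Or.inr ⟨h1, h2, hi2⟩) h
  · rfl
  · rfl

lemma pvCell (units : List String) (i j : Nat) :
    (if (i, j) ∈ (PySem.List.enumerate units).flatMap pvEdgesU ++ [(units.length, units.length + 1)]
       then (1 : Int) else 0)
      = pvEdgeB (units.map pvParams) (units.length + 2) i j := by
  have hd2 : units.length + 2 - 2 = units.length := by omega
  have hd1 : units.length + 2 - 1 = units.length + 1 := by omega
  simp only [pvEdgeB, List.length_map, hd2, hd1]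
  by_cases he : (i, j) = (units.length, units.length + 1)
  · rw [if_pos he, if_pos (List.mem_append.mpr (Or.inr (by simp [he])))]
  · rw [if_neg he]
    by_cases hm : (i, j) ∈ (PySem.List.enumerate units).flatMap pvEdgesU
        ++ [(units.length, units.length + 1)]
    · rw [if_pos hm]
      have hE : (i, j) ∈ (PySem.List.enumerate units).flatMap pvEdgesU :=
        (List.mem_append.mp hm).resolve_right (by simpa using he)
      obtain ⟨hj1, hjn, hh⟩ := (pvMem_flatMap_edges units i j).mp hE
      rw [if_pos ⟨hj1, hjn⟩]
      have hk : j - 1 < units.length := by omega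
      have hp : (units.map pvParams).getD (j - 1) [] = pvParams (units.getD (j - 1) "") := by
        simp [List.getD_eq_getElem?_getD, List.getElem?_eq_getElem hk]
      rw [hp, pvUnitVal_hit _ _ _ hh]
    · rw [if_neg hm]
      have hE : ¬ (1 ≤ j ∧ j ≤ units.length ∧ pvHit (pvParams (units.getD (j - 1) "")) i j) := by
        rw [← pvMem_flatMap_edges]
        exact fun h => hm (List.mem_append.mpr (Or.inl h))
      by_cases hj : 1 ≤ j ∧ j ≤ units.length
      · rw [if_pos hj]
        have hk : j - 1 < units.length := by omega
        have hp : (units.map pvParams).getD (j - 1) [] = pvParams (units.getD (j - 1) "") := by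
          simp [List.getD_eq_getElem?_getD, List.getElem?_eq_getElem hk]
        rw [hp, pvUnitVal_miss _ _ _ (fun hh => hE ⟨hj.1, hj.2, hh⟩)]
      · rw [if_neg hj]

lemma pvDense_eq_edgeB (units : List String) :
    pvDense (units.length + 2)
        ((PySem.List.enumerate units).flatMap pvEdgesU ++ [(units.length, units.length + 1)])
      = (List.range (units.length + 2)).map (fun i => (List.range (units.length + 2)).map
          (fun j => pvEdgeB (units.map pvParams) (units.length + 2) i j)) := by
  unfold pvDense
  apply List.map_congr_left
  intro i _
  apply List.map_congr_left
  intro j _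
  exact pvCell units i j

-- ===== VERDICT (by name: the statement is the Claim_ definition above) =====
theorem get_adjacency_matrix_with_params_spec : Claim_equal_get_adjacency_matrix_with_params := by
  intro gene _ _
  unfold Spec_get_adjacency_matrix_with_params
  simp only [get_adjacency_matrix_with_params, get_adjacency_matrix_with_params_alt,
             pv_get_units_by_gene]
  rw [pvFoldA]
  dsimp only
  set units := PySem.List.slice ((PySem.Str.split? gene "-").getD []) (some 1) (some (-1))
  have hd2 : units.length + 2 - 2 = units.length := by omega
  have hd1 : units.length + 2 - 1 = units.length + 1 := by omega
  rw [Prod.mk.injEq]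
  constructor
  · rw [hd2, hd1,
        show pvSet2 (pvApply ((List.range (units.length + 2)).map (fun _ => (List.range (units.length + 2)).map (fun _ => (0 : Int)))) ((PySem.List.enumerate units).flatMap pvEdgesU)) units.length (units.length + 1)
          = pvApply ((List.range (units.length + 2)).map (fun _ => (List.range (units.length + 2)).map (fun _ => (0 : Int)))) ((PySem.List.enumerate units).flatMap pvEdgesU ++ [(units.length, units.length + 1)]) by
          simp [pvApply, List.foldl_append]]
    rw [pvApply_zero_eq_dense, pvDense_eq_edgeB]
  · rw [pvFlatMap_enumerate_info]
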